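-- pv_equiv track=rewrite | github.com/Lixipluv/LFA2025 | Dfa_b.py | dfa_b
-- ===== SOURCE A (Python) =====
-- def dfa_b(cadeia):
--     """Verifica se a cadeia pertence à linguagem {a,b}* onde o último símbolo é 'b' e o número de 'a' é par."""
--     estado = 0
--     transicoes = {
--         (0, 'a'): 1, (0, 'b'): 0,
--         (1, 'a'): 0, (1, 'b'): 1
--     }
--
--     for simbolo in cadeia:
--         estado = transicoes.get((estado, simbolo))
--         if estado is None:
--             return False
--
--     return estado == 0
-- ===== SOURCE B (Python) =====
-- def dfa_b(cadeia):
--     """Closed-form: string is in the language iff every symbol is 'a'/'b' and the number of 'a' is even."""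
--     if not all(c in ('a', 'b') for c in cadeia):
--         return False
--     return cadeia.count('a') % 2 == 0
-- ===== Notes on version B (the rewrite author's own statement) =====
-- stated objective: simpler
-- what changed: Replaced the transition-table DFA simulation with a closed-form test: validate that every character is 'a' or 'b', then return whether the count of 'a' is even.
import Mathlib
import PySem

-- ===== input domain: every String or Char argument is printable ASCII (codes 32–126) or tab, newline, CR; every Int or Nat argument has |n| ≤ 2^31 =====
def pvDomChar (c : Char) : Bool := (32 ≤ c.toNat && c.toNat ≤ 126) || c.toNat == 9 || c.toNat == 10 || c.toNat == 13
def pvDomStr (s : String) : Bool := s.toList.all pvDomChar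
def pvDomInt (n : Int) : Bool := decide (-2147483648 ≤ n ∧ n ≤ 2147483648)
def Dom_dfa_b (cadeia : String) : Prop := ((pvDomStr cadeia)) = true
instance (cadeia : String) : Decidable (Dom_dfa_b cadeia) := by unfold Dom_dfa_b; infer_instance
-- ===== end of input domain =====

-- B replaces the DFA simulation by a closed-form test: all symbols in {'a','b'} and the count of 'a' even (simpler).

-- ===== PORT A =====
-- transicoes.get ((estado, simbolo)) : the literal 4-entry transition dict of A
def dfa_b_trans (p : Int × Char) : Option Int :=
  PySem.Dict.get? (PySem.Dict.ofList [((0, 'a'), 1), ((0, 'b'), 0), ((1, 'a'), 0), ((1, 'b'), 1)]) p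

-- the for-loop of A: step estado through the string, returning False when the dict has no key
def dfa_b_loop (estado : Int) : List Char → Bool
  | [] => estado == 0
  | c :: rest =>
    match dfa_b_trans (estado, c) with
    | none => false
    | some e => dfa_b_loop e rest

def dfa_b (cadeia : String) : Bool := dfa_b_loop 0 cadeia.toList

-- ===== PORT B =====
def dfa_b_alt (cadeia : String) : Bool :=
  if cadeia.toList.all (fun c => c == 'a' || c == 'b')
  then PySem.Int.mod (PySem.Str.count cadeia "a" : Int) 2 == 0
  else false

-- ===== PRECONDITION & SPEC =====
def Spec_dfa_b (cadeia : String) (out : Bool) : Prop := out = dfa_b_alt cadeia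
instance (cadeia : String) (out : Bool) : Decidable (Spec_dfa_b cadeia out) := by unfold Spec_dfa_b; infer_instance

-- ===== CLAIM (what is proved, stated in full; the proofs are below) =====
def Claim_equal_dfa_b : Prop := ∀ (cadeia : String), Dom_dfa_b cadeia → Spec_dfa_b cadeia (dfa_b cadeia)

-- ===== LEMMAS AND PROOFS =====

lemma dfa_b_count_go (l : List Char) : ∀ (fuel acc : Nat), l.length ≤ fuel →
    PySem.Chars.count.go ['a'] fuel l acc = acc + l.count 'a' := by
  induction l with
  | nil =>
    intro fuel acc _
    unfold PySem.Chars.count.go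
    cases fuel <;> simp
  | cons c t ih =>
    intro fuel acc h
    cases fuel with
    | zero => simp at h
    | succ f =>
      unfold PySem.Chars.count.go
      by_cases hc : c = 'a'
      · subst hc
        simp [ih f (acc + 1) (by simpa using h)]
        omega
      · simp [List.cons_prefix_cons, hc, (show ¬('a' = c) from fun h' => hc h'.symm),
          ih f acc (by simpa using h)]

lemma dfa_b_count_singleton (l : List Char) :
    PySem.Chars.count l ['a'] = l.count 'a' := by
  simp [PySem.Chars.count, dfa_b_count_go l l.length 0 le_rfl]

lemma dfa_b_loop_eq (l : List Char) : ∀ (e : Int), (e = 0 ∨ e = 1) →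
    dfa_b_loop e l =
      (l.all (fun c => c == 'a' || c == 'b') &&
        decide ((e + (l.count 'a' : Int)) % 2 = 0)) := by
  induction l with
  | nil =>
    intro e he
    rcases he with h | h <;> subst h <;> simp [dfa_b_loop]
  | cons c t ih =>
    intro e he
    by_cases hc : c = 'a'
    · subst hc
      rcases he with h | h <;> subst h
      · simp only [dfa_b_loop, show dfa_b_trans (0, 'a') = some 1 from by decide,
          ih 1 (Or.inr rfl), List.all_cons, List.count_cons]
        cases ht : t.all (fun c => c == 'a' || c == 'b')
        · simp
        · simp only [Bool.true_and, Bool.and_true]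
          simp [decide_eq_decide]
          omega
      · simp only [dfa_b_loop, show dfa_b_trans (1, 'a') = some 0 from by decide,
          ih 0 (Or.inl rfl), List.all_cons, List.count_cons]
        cases ht : t.all (fun c => c == 'a' || c == 'b')
        · simp
        · simp only [Bool.true_and, Bool.and_true]
          simp [decide_eq_decide]
          omega
    · by_cases hb : c = 'b'
      · subst hb
        rcases he with h | h <;> subst h
        · simp only [dfa_b_loop, show dfa_b_trans (0, 'b') = some 0 from by decide,
            ih 0 (Or.inl rfl), List.all_cons, List.count_cons]
          simp
        · simp only [dfa_b_loop, show dfa_b_trans (1, 'b') = some 1 from by decide,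
            ih 1 (Or.inr rfl), List.all_cons, List.count_cons]
          simp
      · have hnone : dfa_b_trans (e, c) = none := by
          have h1 : ∀ (k : Int) (d : Char), d = 'a' ∨ d = 'b' → ((k, d) == (e, c)) = false := by
            intro k d hd
            apply beq_eq_false_iff_ne.mpr
            intro h
            rcases hd with h' | h' <;> subst h' <;>
              [exact hc (congrArg Prod.snd h).symm; exact hb (congrArg Prod.snd h).symm]
          simp [dfa_b_trans, PySem.Dict.get?, PySem.Dict.ofList, PySem.Dict.update,
            PySem.Dict.insert, PySem.Dict.empty, List.find?, h1 0 'a' (Or.inl rfl),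
            h1 0 'b' (Or.inr rfl), h1 1 'a' (Or.inl rfl), h1 1 'b' (Or.inr rfl)]
        simp [dfa_b_loop, hnone, hc, hb]

-- ===== VERDICT (by name: the statement is the Claim_ definition above) =====
theorem dfa_b_spec : Claim_equal_dfa_b := by
  intro cadeia _
  unfold Spec_dfa_b dfa_b dfa_b_alt
  rw [dfa_b_loop_eq _ 0 (Or.inl rfl)]
  by_cases hall : cadeia.toList.all (fun c => c == 'a' || c == 'b') = true
  · rw [if_pos hall]
    rw [show PySem.Str.count cadeia "a" = cadeia.toList.count 'a' from by
      simp [dfa_b_count_singleton]]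
    rw [PySem.Int.mod_eq_emod_of_pos (by norm_num : (0:Int) < 2)]
    simp only [hall, Bool.true_and]
    cases hd : (((cadeia.toList.count 'a' : Int)) % 2 == 0) <;> simp_all
  · simp [hall]
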